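-- pv_equiv track=rewrite | github.com/sbrommer/advent-of-code | 2017/14/main.py | tie_string
-- ===== SOURCE A (Python) =====
-- def reverse(string, i):
--     return string[:i][::-1] + string[i:]
--
-- def move(string, pos):
--     return string[pos:] + string[:pos]
--
-- def tie_string(sequence, r=1):
--     string = list(range(256))
--     skip = 0
--     dpos = 0
--
--     for _ in range(r):
--         for i in sequence:
--             pos = (i+skip) % len(string)
--
--             string = reverse(string, i)
--             string = move(string, pos)
--
--             dpos += pos
--             skip += 1
--
--     pos = -(dpos % len(string))  # original position 0
--     return move(string, pos)
-- ===== SOURCE B (Python) =====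
-- def tie_string(sequence, r=1):
--     buf = list(range(256))
--     cur = 0
--     skip = 0
--     for _ in range(r):
--         for i in sequence:
--             seg = (buf[cur:] + buf[:cur])[:i][::-1]
--             head, tail = seg[:256 - cur], seg[256 - cur:]
--             buf[cur:cur + len(head)] = head
--             buf[:len(tail)] = tail
--             cur = (cur + i + skip) % 256
--             skip += 1
--     return buf
-- ===== Notes on version B (the rewrite author's own statement) =====
-- stated objective: alternative
-- what changed: B keeps the 256-cell buffer in absolute coordinates with a running position, slicing out each step's wrapped segment and writing it back reversed in place, instead of A's rebuilding the whole list each step by slice-reverse plus slice-rotate while accumulating a total rotation that a final counter-rotation undoes.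
import Mathlib
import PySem

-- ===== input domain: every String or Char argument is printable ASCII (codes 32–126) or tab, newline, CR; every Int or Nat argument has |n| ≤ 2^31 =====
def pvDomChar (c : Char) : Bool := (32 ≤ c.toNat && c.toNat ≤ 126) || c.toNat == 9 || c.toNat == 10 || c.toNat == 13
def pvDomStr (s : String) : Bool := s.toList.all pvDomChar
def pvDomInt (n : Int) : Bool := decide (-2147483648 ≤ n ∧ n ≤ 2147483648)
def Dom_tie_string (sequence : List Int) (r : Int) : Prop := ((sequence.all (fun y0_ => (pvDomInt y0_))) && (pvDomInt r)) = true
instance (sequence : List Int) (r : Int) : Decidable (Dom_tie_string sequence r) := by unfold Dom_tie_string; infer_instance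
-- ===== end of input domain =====

-- B keeps the 256-cell buffer in absolute coordinates with a running position: each step
-- slices the wrapped segment out of the logical string and writes it back reversed in place,
-- instead of A's rebuilding the whole list by slice-reverse and slice-rotate and undoing the
-- accumulated rotation at the end (objective: alternative; return values proved equal).

-- ===== PORT A =====
-- string[:i][::-1] + string[i:]
def pyReverse (string : List Int) (i : Int) : List Int :=
  (PySem.List.slice string none (some i)).reverse ++ PySem.List.slice string (some i) none

-- string[pos:] + string[:pos]
def pyMove (string : List Int) (pos : Int) : List Int :=
  PySem.List.slice string (some pos) none ++ PySem.List.slice string none (some pos)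

-- body of A's inner loop; state = (string, skip, dpos)
def tieStepA (st : List Int × Int × Int) (i : Int) : List Int × Int × Int :=
  let pos := PySem.Int.mod (i + st.2.1) (st.1.length : Int)
  (pyMove (pyReverse st.1 i) pos, st.2.1 + 1, st.2.2 + pos)

-- final 'pos = -(dpos % len(string)); return move(string, pos)'
def tieFinA (st : List Int × Int × Int) : List Int :=
  pyMove st.1 (-(PySem.Int.mod st.2.2 (st.1.length : Int)))

def tie_string (sequence : List Int) (r : Int) : List Int :=
  tieFinA ((PySem.List.pyRange 0 r 1).foldl
    (fun st _ => sequence.foldl tieStepA st)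
    (PySem.List.pyRange 0 256 1, 0, 0))

-- ===== PORT B =====
-- body of B's inner loop; state = (buf, cur, skip):
--   seg = (buf[cur:] + buf[:cur])[:i][::-1]
--   head, tail = seg[:256 - cur], seg[256 - cur:]
--   buf[cur:cur + len(head)] = head      (slice assignment, ported by hand as the
--   buf[:len(tail)] = tail                concatenation it performs: the assigned slice
--                                         has exactly the replacement's length)
--   cur = (cur + i + skip) % 256; skip += 1
def tieStepB (st : List Int × Nat × Int) (i : Int) : List Int × Nat × Int :=
  let seg := (PySem.List.slice
      (PySem.List.slice st.1 (some (st.2.1 : Int)) none ++ PySem.List.slice st.1 none (some (st.2.1 : Int)))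
      none (some i)).reverse
  let head := PySem.List.slice seg none (some ((256 : Int) - (st.2.1 : Int)))
  let tail := PySem.List.slice seg (some ((256 : Int) - (st.2.1 : Int))) none
  let buf1 := PySem.List.slice st.1 none (some (st.2.1 : Int)) ++ head
      ++ PySem.List.slice st.1 (some ((st.2.1 : Int) + (head.length : Int))) none
  let buf2 := tail ++ PySem.List.slice buf1 (some (tail.length : Int)) none
  (buf2, (PySem.Int.mod ((st.2.1 : Int) + i + st.2.2) 256).toNat, st.2.2 + 1)

def tie_string_alt (sequence : List Int) (r : Int) : List Int :=
  ((PySem.List.pyRange 0 r 1).foldl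
    (fun st _ => sequence.foldl tieStepB st)
    (PySem.List.pyRange 0 256 1, 0, 0)).1

-- ===== PRECONDITION & SPEC =====
def Spec_tie_string (sequence : List Int) (r : Int) (out : List Int) : Prop := out = tie_string_alt sequence r
instance (sequence : List Int) (r : Int) (out : List Int) : Decidable (Spec_tie_string sequence r out) := by unfold Spec_tie_string; infer_instance

-- ===== CLAIM (what is proved, stated in full; the proofs are below) =====
def Claim_equal_tie_string : Prop := ∀ (sequence : List Int) (r : Int), Dom_tie_string sequence r → Spec_tie_string sequence r (tie_string sequence r)

-- ===== LEMMAS AND PROOFS =====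

-- length of the prefix Python's string[:i] keeps, as a function of i (proof-side helper)
def effLen (i : Int) : Int := if 0 ≤ i then min i 256 else max 0 (256 + i)

-- simulation invariant: A's rotated string is B's buffer rotated by B's position,
-- skips agree, and B's position is A's dpos mod 256
def SimInv (stA : List Int × Int × Int) (stB : List Int × Nat × Int) : Prop :=
  stB.1.length = 256 ∧ stB.2.1 < 256 ∧ stA.1 = stB.1.rotate stB.2.1 ∧
  stA.2.1 = stB.2.2 ∧ PySem.Int.mod stA.2.2 256 = (stB.2.1 : Int)

-- the written-back buffer, as the port's concatenations produce it (proof-side form)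
def wbList (buf : List Int) (cur : Nat) (seg : List Int) : List Int :=
  seg.drop (256 - cur) ++
    (buf.take cur ++ seg.take (256 - cur) ++ buf.drop (cur + (seg.take (256 - cur)).length)).drop
      (seg.drop (256 - cur)).length

theorem length_wbList (buf : List Int) (cur : Nat) (seg : List Int)
    (hlen : buf.length = 256) (hc : cur < 256) (hL : seg.length ≤ 256) :
    (wbList buf cur seg).length = 256 := by
  unfold wbList
  simp [hlen]
  omega

-- B's write-back, pointwise: position u receives seg[w] where w is u's offset from cur
theorem getD_wbList (seg buf : List Int) (cur u : Nat)
    (hlen : buf.length = 256) (hc : cur < 256) (hL : seg.length ≤ 256) (hu : u < 256) :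
    (wbList buf cur seg).getD u 0 =
      if (u + 256 - cur) % 256 < seg.length then seg.getD ((u + 256 - cur) % 256) 0
      else buf.getD u 0 := by
  have hwb : (wbList buf cur seg).length = 256 := length_wbList buf cur seg hlen hc hL
  have hh : (seg.take (256 - cur)).length = min seg.length (256 - cur) := by
    simp [Nat.min_comm]
  have ht : (seg.drop (256 - cur)).length = seg.length - (256 - cur) := by simp
  have hcl : (buf.take cur).length = cur := by simp [hlen]; omega
  have hB1 : (buf.take cur ++ seg.take (256 - cur)
      ++ buf.drop (cur + (seg.take (256 - cur)).length)).length = 256 := by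
    simp [hlen]; omega
  unfold wbList
  by_cases hut : u < (seg.drop (256 - cur)).length
  · rw [List.getD_eq_getElem _ _ (by unfold wbList at hwb; omega),
      List.getElem_append_left (by omega), List.getElem_drop, ← List.getD_eq_getElem]
    have hw : (u + 256 - cur) % 256 = 256 - cur + u := by omega
    rw [if_pos (by omega), hw]
  · rw [List.getD_eq_getElem _ _ (by unfold wbList at hwb; omega),
      List.getElem_append_right (by omega), List.getElem_drop]
    have hidx : (seg.drop (256 - cur)).length
        + (u - (seg.drop (256 - cur)).length) = u := by omega
    simp only [hidx]
    by_cases hu1 : u < cur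
    · rw [List.getElem_append_left (by simp [hlen]; omega),
        List.getElem_append_left (by omega), List.getElem_take, ← List.getD_eq_getElem]
      rw [if_neg (by omega)]
    · by_cases hu2 : u < cur + (seg.take (256 - cur)).length
      · rw [List.getElem_append_left (by simp [hlen]; omega),
          List.getElem_append_right (by omega), List.getElem_take, ← List.getD_eq_getElem]
        have hw : (u + 256 - cur) % 256 = u - (buf.take cur).length := by omega
        rw [if_pos (by omega), hw]
      · rw [List.getElem_append_right (by simp [hlen]; omega), List.getElem_drop,
          ← List.getD_eq_getElem]
        have : cur + (seg.take (256 - cur)).length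
            + (u - (buf.take cur ++ seg.take (256 - cur)).length) = u := by
          simp only [List.length_append, hcl]
          omega
        rw [this, if_neg (by omega)]

theorem getD_rotate (l : List Int) (n k : Nat) (hlen : l.length = 256) (hk : k < 256) :
    (l.rotate n).getD k 0 = l.getD ((k + n) % 256) 0 := by
  rw [List.getD_eq_getElem _ _ (by simp [hlen]; omega), List.getElem_rotate]
  simp only [hlen]
  rw [List.getD_eq_getElem _ _ (by omega)]

-- the segment B writes back (reversed wrapped window), pointwise in the original buffer
theorem getD_segRev (buf : List Int) (cur L w : Nat)
    (hlen : buf.length = 256) (hL : L ≤ 256) (hw : w < L) :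
    (((buf.rotate cur).take L).reverse).getD w 0 = buf.getD ((cur + (L - 1 - w)) % 256) 0 := by
  have hrl : (buf.rotate cur).length = 256 := by simp [hlen]
  have htl : ((buf.rotate cur).take L).length = L := by simp [hrl]; omega
  rw [List.getD_eq_getElem _ _ (by simp [htl]; omega), List.getElem_reverse,
    List.getElem_take, List.getElem_rotate]
  rw [← List.getD_eq_getElem]
  congr 1
  simp only [htl, hlen]
  omega

-- B's write-back realises A's prefix-reverse, up to the rotation by cur
theorem rotate_writeBack (buf : List Int) (cur : Nat) (L : Nat)
    (hlen : buf.length = 256) (hc : cur < 256) (hL : L ≤ 256) :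
    ((buf.rotate cur).take L).reverse ++ (buf.rotate cur).drop L =
      (wbList buf cur (((buf.rotate cur).take L).reverse)).rotate cur := by
  have hrl : (buf.rotate cur).length = 256 := by simp [hlen]
  have hsl : (((buf.rotate cur).take L).reverse).length = L := by simp [hrl]; omega
  have hwl : (wbList buf cur (((buf.rotate cur).take L).reverse)).length = 256 :=
    length_wbList _ _ _ hlen hc (by omega)
  apply List.ext_getElem
  · simp [hrl, hwl]; omega
  · intro t ht1 ht2
    have ht : t < 256 := by simp [hwl] at ht2; omega
    rw [← List.getD_eq_getElem _ 0 ht1, ← List.getD_eq_getElem _ 0 ht2]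
    rw [getD_rotate _ _ _ hwl ht, getD_wbList _ _ _ _ hlen hc (by omega) (by omega)]
    rw [hsl]
    have hj0 : ((t + cur) % 256 + 256 - cur) % 256 = t := by omega
    rw [hj0]
    rw [List.getD_eq_getElem _ 0 ht1, List.getElem_append]
    by_cases htL : t < L
    · rw [dif_pos (by simp [hrl]; omega), if_pos htL]
      rw [getD_segRev _ _ _ _ hlen hL htL]
      rw [List.getElem_reverse, List.getElem_take, List.getElem_rotate]
      rw [← List.getD_eq_getElem]
      congr 1
      simp only [List.length_take, hrl, hlen]
      omega
    · rw [dif_neg (by simp [hrl]; omega), if_neg htL]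
      rw [List.getElem_drop, List.getElem_rotate]
      rw [← List.getD_eq_getElem]
      congr 1
      simp only [List.length_reverse, List.length_take, hrl, hlen]
      omega

theorem effLen_toNat_le (i : Int) : (effLen i).toNat ≤ 256 := by
  unfold effLen; split_ifs <;> omega

theorem slice_to_effLen (s : List Int) (i : Int) (h : s.length = 256) :
    PySem.List.slice s none (some i) = s.take (effLen i).toNat := by
  unfold effLen
  by_cases hi : 0 ≤ i
  · rw [PySem.List.slice_to s hi, if_pos hi]
    by_cases hle : i.toNat ≤ 256
    · have : (min i 256).toNat = i.toNat := by omega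
      rw [this]
    · have h1 : (min i 256).toNat = 256 := by omega
      rw [h1, List.take_of_length_le (by omega), List.take_of_length_le (by omega)]
  · rw [if_neg hi]
    have hk : i = -(((-i).toNat : Nat) : Int) := by omega
    rw [hk, PySem.List.slice_to_neg_natCast s _ (by omega)]
    have : (max 0 (256 + -((((-i).toNat : Nat)) : Int))).toNat = s.length - (-i).toNat := by
      omega
    rw [this]

theorem slice_from_effLen (s : List Int) (i : Int) (h : s.length = 256) :
    PySem.List.slice s (some i) none = s.drop (effLen i).toNat := by
  unfold effLen
  by_cases hi : 0 ≤ i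
  · rw [PySem.List.slice_from s hi, if_pos hi]
    by_cases hle : i.toNat ≤ 256
    · have : (min i 256).toNat = i.toNat := by omega
      rw [this]
    · have h1 : (min i 256).toNat = 256 := by omega
      rw [h1, List.drop_eq_nil_of_le (by omega), List.drop_eq_nil_of_le (by omega)]
  · rw [if_neg hi]
    have hk : i = -(((-i).toNat : Nat) : Int) := by omega
    rw [hk, PySem.List.slice_from_neg_natCast s _ (by omega)]
    have : (max 0 (256 + -((((-i).toNat : Nat)) : Int))).toNat = s.length - (-i).toNat := by
      omega
    rw [this]

theorem pyReverse_eq (s : List Int) (i : Int) (h : s.length = 256) :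
    pyReverse s i = (s.take (effLen i).toNat).reverse ++ s.drop (effLen i).toNat := by
  unfold pyReverse
  rw [slice_to_effLen s i h, slice_from_effLen s i h]

theorem pyMove_eq (s : List Int) (p : Int) (h : s.length = 256) (h0 : 0 ≤ p) (h1 : p < 256) :
    pyMove s p = s.rotate p.toNat := by
  unfold pyMove
  rw [PySem.List.slice_from s h0, PySem.List.slice_to s h0,
    List.rotate_eq_drop_append_take (by omega)]

theorem step_SimInv (stA : List Int × Int × Int) (stB : List Int × Nat × Int) (i : Int)
    (h : SimInv stA stB) : SimInv (tieStepA stA i) (tieStepB stB i) := by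
  obtain ⟨hlen, hc, hstr, hskip, hdpos⟩ := h
  have hslen : stA.1.length = 256 := by rw [hstr]; simp [hlen]
  have hmodgen : ∀ a : Int, PySem.Int.mod a 256 = a % 256 :=
    fun a => PySem.Int.mod_eq_emod_of_pos (by norm_num)
  have hL : (effLen i).toNat ≤ 256 := effLen_toNat_le i
  -- B's seg (before reversal) is the L-prefix of the logical string
  have hrot : PySem.List.slice stB.1 (some (stB.2.1 : Int)) none
      ++ PySem.List.slice stB.1 none (some (stB.2.1 : Int)) = stB.1.rotate stB.2.1 := by
    rw [PySem.List.slice_from stB.1 (by omega), PySem.List.slice_to stB.1 (by omega),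
      Int.toNat_natCast, List.rotate_eq_drop_append_take (by omega)]
  have hseg : (PySem.List.slice
      (PySem.List.slice stB.1 (some (stB.2.1 : Int)) none ++ PySem.List.slice stB.1 none (some (stB.2.1 : Int)))
      none (some i)).reverse = ((stB.1.rotate stB.2.1).take (effLen i).toNat).reverse := by
    rw [hrot, slice_to_effLen _ _ (by simp [hlen])]
  have hsl : (((stB.1.rotate stB.2.1).take (effLen i).toNat).reverse).length
      = (effLen i).toNat := by simp [hlen]; omega
  have hhead : PySem.List.slice (((stB.1.rotate stB.2.1).take (effLen i).toNat).reverse)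
      none (some ((256 : Int) - (stB.2.1 : Int)))
      = (((stB.1.rotate stB.2.1).take (effLen i).toNat).reverse).take (256 - stB.2.1) := by
    rw [PySem.List.slice_to _ (by omega)]
    congr 1
    omega
  have htail : PySem.List.slice (((stB.1.rotate stB.2.1).take (effLen i).toNat).reverse)
      (some ((256 : Int) - (stB.2.1 : Int))) none
      = (((stB.1.rotate stB.2.1).take (effLen i).toNat).reverse).drop (256 - stB.2.1) := by
    rw [PySem.List.slice_from _ (by omega)]
    congr 1
    omega
  have htake : PySem.List.slice stB.1 none (some (stB.2.1 : Int)) = stB.1.take stB.2.1 := by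
    rw [PySem.List.slice_to stB.1 (by omega), Int.toNat_natCast]
  have hdropA : ∀ m : Nat, PySem.List.slice stB.1 (some ((stB.2.1 : Int) + (m : Int))) none
      = stB.1.drop (stB.2.1 + m) := by
    intro m
    rw [PySem.List.slice_from stB.1 (by omega)]
    congr 1
  have hdropB : ∀ (x : List Int) (m : Nat), PySem.List.slice x (some ((m : Nat) : Int)) none
      = x.drop m := by
    intro x m
    rw [PySem.List.slice_from x (by omega), Int.toNat_natCast]
  have hB1 : (tieStepB stB i).1 = wbList stB.1 stB.2.1
      (((stB.1.rotate stB.2.1).take (effLen i).toNat).reverse) := by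
    simp only [tieStepB]
    rw [hseg, hhead, htail, htake, hdropA, hdropB]
    unfold wbList
    rfl
  have hwlen : (tieStepB stB i).1.length = 256 := by
    rw [hB1]
    exact length_wbList _ _ _ hlen hc (by omega)
  have hB2 : ((tieStepB stB i).2.1 : Int) = ((stB.2.1 : Int) + i + stB.2.2) % 256 := by
    simp only [tieStepB, hmodgen]
    omega
  have hB2lt : (tieStepB stB i).2.1 < 256 := by omega
  have hB2' : (tieStepB stB i).2.1 = (((stB.2.1 : Int) + i + stB.2.2) % 256).toNat := by
    omega
  have hB3 : (tieStepB stB i).2.2 = stB.2.2 + 1 := rfl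
  have hA1 : (tieStepA stA i).1 = pyMove (pyReverse stA.1 i) ((i + stA.2.1) % 256) := by
    simp only [tieStepA, hslen, Nat.cast_ofNat, hmodgen]
  have hA2 : (tieStepA stA i).2.1 = stA.2.1 + 1 := rfl
  have hA3 : (tieStepA stA i).2.2 = stA.2.2 + (i + stA.2.1) % 256 := by
    simp only [tieStepA, hslen, Nat.cast_ofNat, hmodgen]
  rw [hskip] at hA1 hA3
  refine ⟨hwlen, hB2lt, ?_, ?_, ?_⟩
  · rw [hA1, hB1, hB2']
    have hp0 : (0:Int) ≤ (i + stB.2.2) % 256 := Int.emod_nonneg _ (by norm_num)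
    have hp1 : (i + stB.2.2) % 256 < 256 := Int.emod_lt_of_pos _ (by norm_num)
    rw [pyMove_eq _ _ (by rw [pyReverse_eq _ _ hslen]; simp [hslen]; omega) hp0 hp1,
      pyReverse_eq _ _ hslen, hstr, rotate_writeBack _ _ _ hlen hc hL, List.rotate_rotate,
      ← List.rotate_mod,
      length_wbList _ _ _ hlen hc (by omega)]
    congr 1
    omega
  · rw [hA2, hB3, hskip]
  · rw [hA3, hB2, hmodgen]
    rw [hmodgen] at hdpos
    omega

theorem foldl_inner_SimInv (seq : List Int) :
    ∀ stA stB, SimInv stA stB → SimInv (seq.foldl tieStepA stA) (seq.foldl tieStepB stB) := by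
  induction seq with
  | nil => intro stA stB h; exact h
  | cons x xs ih =>
    intro stA stB h
    exact ih _ _ (step_SimInv _ _ _ h)

theorem foldl_outer_SimInv (l : List Int) (seq : List Int) :
    ∀ stA stB, SimInv stA stB →
      SimInv (l.foldl (fun st _ => seq.foldl tieStepA st) stA)
          (l.foldl (fun st _ => seq.foldl tieStepB st) stB) := by
  induction l with
  | nil => intro stA stB h; exact h
  | cons x xs ih =>
    intro stA stB h
    exact ih _ _ (foldl_inner_SimInv seq _ _ h)

theorem init_SimInv :
    SimInv (PySem.List.pyRange 0 256 1, 0, 0) (PySem.List.pyRange 0 256 1, 0, 0) := by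
  refine ⟨by simp [PySem.List.length_pyRange_one], by decide, by simp, rfl, by decide⟩

theorem final_eq (stA : List Int × Int × Int) (stB : List Int × Nat × Int)
    (h : SimInv stA stB) : tieFinA stA = stB.1 := by
  obtain ⟨hlen, hc, hstr, _, hdpos⟩ := h
  have hslen : stA.1.length = 256 := by rw [hstr]; simp [hlen]
  unfold tieFinA pyMove
  simp only [hslen, Nat.cast_ofNat, hdpos]
  by_cases h0 : stB.2.1 = 0
  · rw [h0]
    norm_num
    rw [PySem.List.slice_to stA.1 (le_refl (0:Int))]
    simp [hstr, h0]
  · rw [PySem.List.slice_from_neg_natCast _ _ (by omega),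
      PySem.List.slice_to_neg_natCast _ _ (by omega), hslen]
    rw [← List.rotate_eq_drop_append_take (by omega), hstr, List.rotate_rotate]
    have : stB.2.1 + (256 - stB.2.1) = stB.1.length := by omega
    rw [this, List.rotate_length]

-- ===== VERDICT (by name: the statement is the Claim_ definition above) =====
theorem tie_string_spec : Claim_equal_tie_string := by
  intro sequence r _
  unfold Spec_tie_string tie_string tie_string_alt
  exact final_eq _ _ (foldl_outer_SimInv _ _ _ _ init_SimInv)
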